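-- pv_equiv track=rewrite | github.com/TheAbysmalKraken/KrakFlip | VoltorbFlip.py | get_voltorbs
-- ===== SOURCE A (Python) =====
-- def get_voltorbs(board):
--     voltorbs = [[],[]]
--     for row in range(0,5):
--         rowTotal = board[row].count(0)
--         voltorbs[1].append(rowTotal)
--     for col in range(0,5):
--         colTotal = 0
--         for row in range(0,5):
--             if board[row][col] == 0:
--                 colTotal += 1
--         voltorbs[0].append(colTotal)
--     return voltorbs
-- ===== SOURCE B (Python) =====
-- def get_voltorbs(board):
--     cols = [0, 0, 0, 0, 0]
--     rows = []
--     for i in range(5):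
--         r = board[i]
--         rows.append(sum(1 for v in r if v == 0))
--         cols = [cols[c] + 1 if r[c] == 0 else cols[c] for c in range(5)]
--     return [cols, rows]
-- ===== Notes on version B (the rewrite author's own statement) =====
-- stated objective: alternative
-- what changed: A makes two separate passes (a row pass using list.count, then a column-major nested loop appending each column total); B makes one fused row-major pass that appends each row's zero count and rebuilds a length-5 column-tally vector by comprehension.
import Mathlib
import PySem

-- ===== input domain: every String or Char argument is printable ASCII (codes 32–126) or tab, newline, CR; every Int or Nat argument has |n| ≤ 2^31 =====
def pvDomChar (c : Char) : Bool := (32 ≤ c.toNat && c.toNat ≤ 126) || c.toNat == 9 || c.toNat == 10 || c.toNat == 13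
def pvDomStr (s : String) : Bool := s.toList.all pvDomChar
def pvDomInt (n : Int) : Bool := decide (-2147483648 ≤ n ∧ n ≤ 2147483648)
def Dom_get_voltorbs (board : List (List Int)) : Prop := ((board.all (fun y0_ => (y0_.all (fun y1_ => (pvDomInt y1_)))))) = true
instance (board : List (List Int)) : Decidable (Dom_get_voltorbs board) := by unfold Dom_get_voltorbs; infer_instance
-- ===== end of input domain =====

-- B replaces A's two separate passes by one fused row-major pass that appends each row's zero
-- count and rebuilds a length-5 column-tally vector by comprehension (objective: alternative decomposition).

-- ===== PORT A =====
-- board[row] / board[row][col]: PySem.List.pyGet?; `none` cannot occur under Pre_ (getD supplies an unused default).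
def get_voltorbs (board : List (List Int)) : List (List Int) :=
  let rows := (PySem.List.pyRange 0 5 1).foldl
    (fun acc row => acc ++ [(PySem.List.count ((PySem.List.pyGet? board row).getD []) 0 : Int)]) []
  let cols := (PySem.List.pyRange 0 5 1).foldl
    (fun acc col =>
      let colTotal := (PySem.List.pyRange 0 5 1).foldl
        (fun t row =>
          if PySem.List.pyGet? ((PySem.List.pyGet? board row).getD []) col == some 0 then t + 1 else t)
        (0 : Int)
      acc ++ [colTotal]) []
  [cols, rows]

-- ===== PORT B =====
def get_voltorbs_alt (board : List (List Int)) : List (List Int) :=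
  let st := (PySem.List.pyRange 0 5 1).foldl
    (fun (st : List Int × List Int) i =>
      let r := (PySem.List.pyGet? board i).getD []
      ((PySem.List.pyRange 0 5 1).map (fun c =>
          if PySem.List.pyGet? r c == some 0 then (PySem.List.pyGet? st.1 c).getD 0 + 1
          else (PySem.List.pyGet? st.1 c).getD 0),
       st.2 ++ [r.foldl (fun s v => if v == 0 then s + 1 else s) (0 : Int)]))
    ([0, 0, 0, 0, 0], [])
  [st.1, st.2]

-- ===== PRECONDITION & SPEC =====
-- Pre_ excludes exactly the boards on which A raises IndexError: fewer than 5 rows, or one of the first 5 rows shorter than 5.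
def Pre_get_voltorbs (board : List (List Int)) : Prop :=
  5 ≤ board.length ∧ ∀ r ∈ board.take 5, 5 ≤ r.length
instance (board : List (List Int)) : Decidable (Pre_get_voltorbs board) := by unfold Pre_get_voltorbs; infer_instance
def pvWitness_get_voltorbs : List (List Int) :=
  [[0,1,2,3,0],[1,1,1,1,1],[0,0,0,0,0],[2,0,2,0,2],[3,3,3,0,3]]

def Spec_get_voltorbs (board : List (List Int)) (out : List (List Int)) : Prop := out = get_voltorbs_alt board
instance (board : List (List Int)) (out : List (List Int)) : Decidable (Spec_get_voltorbs board out) := by unfold Spec_get_voltorbs; infer_instance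

-- ===== CLAIM (what is proved, stated in full; the proofs are below) =====
def Claim_equal_get_voltorbs : Prop := ∀ (board : List (List Int)), Dom_get_voltorbs board → Pre_get_voltorbs board → Spec_get_voltorbs board (get_voltorbs board)

-- ===== LEMMAS AND PROOFS =====
theorem pv_ex5 {α : Type} (l : List α) (h : 5 ≤ l.length) :
    ∃ a b c d e t, l = a :: b :: c :: d :: e :: t := by
  match l with
  | a :: b :: c :: d :: e :: t => exact ⟨a, b, c, d, e, t, rfl⟩
  | [] | [_] | [_,_] | [_,_,_] | [_,_,_,_] => simp at h

-- ===== VERDICT (by name: the statement is the Claim_ definition above) =====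
theorem get_voltorbs_spec : Claim_equal_get_voltorbs := by
  intro board _ hpre
  obtain ⟨hlen, hrows⟩ := hpre
  obtain ⟨r0, r1, r2, r3, r4, rest, rfl⟩ := pv_ex5 board hlen
  obtain ⟨a0, a1, a2, a3, a4, t0, rfl⟩ := pv_ex5 r0 (hrows r0 (by simp))
  obtain ⟨b0, b1, b2, b3, b4, t1, rfl⟩ := pv_ex5 r1 (hrows r1 (by simp))
  obtain ⟨c0, c1, c2, c3, c4, t2, rfl⟩ := pv_ex5 r2 (hrows r2 (by simp))
  obtain ⟨d0, d1, d2, d3, d4, t3, rfl⟩ := pv_ex5 r3 (hrows r3 (by simp))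
  obtain ⟨e0, e1, e2, e3, e4, t4, rfl⟩ := pv_ex5 r4 (hrows r4 (by simp))
  show _ = _
  have hR : PySem.List.pyRange 0 5 1 = [0, 1, 2, 3, 4] := rfl
  simp only [get_voltorbs, get_voltorbs_alt, PySem.List.foldl_beq_add_one, hR]
  simp [PySem.List.pyGet?_of_nonneg, PySem.List.count_eq, List.count_cons]
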